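-- pv_equiv track=rewrite | github.com/snownz/image_perception | app.py | occurrence_indices
-- ===== SOURCE A (Python) =====
-- def occurrence_indices(strings):
--     counts = {}
--     indices = []
--     for s in strings:
--         # Get the current count (default is 0)
--         count = counts.get(s, 0)
--         indices.append(count)
--         # Update the count for this string
--         counts[s] = count + 1
--     return indices
-- ===== SOURCE B (Python) =====
-- def occurrence_indices(strings):
--     # Sort (index, value) pairs by value (stable, so ties keep original index
--     # order), then one scan assigns each pair its rank within its run of equal
--     # values and scatters that rank back to the original position.
--     pairs = sorted(enumerate(strings), key=lambda p: p[1])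
--     res = [0] * len(pairs)
--     prev = None
--     rank = 0
--     for i, s in pairs:
--         rank = rank + 1 if s == prev else 0
--         res[i] = rank
--         prev = s
--     return res
-- ===== Notes on version B (the rewrite author's own statement) =====
-- stated objective: alternative
-- what changed: Replaces the single forward pass with a running count dictionary by sort-then-scan: stably sort (index, value) pairs by value, assign each pair its rank inside its run of equal values, and scatter the ranks back to the original positions.
import Mathlib
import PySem

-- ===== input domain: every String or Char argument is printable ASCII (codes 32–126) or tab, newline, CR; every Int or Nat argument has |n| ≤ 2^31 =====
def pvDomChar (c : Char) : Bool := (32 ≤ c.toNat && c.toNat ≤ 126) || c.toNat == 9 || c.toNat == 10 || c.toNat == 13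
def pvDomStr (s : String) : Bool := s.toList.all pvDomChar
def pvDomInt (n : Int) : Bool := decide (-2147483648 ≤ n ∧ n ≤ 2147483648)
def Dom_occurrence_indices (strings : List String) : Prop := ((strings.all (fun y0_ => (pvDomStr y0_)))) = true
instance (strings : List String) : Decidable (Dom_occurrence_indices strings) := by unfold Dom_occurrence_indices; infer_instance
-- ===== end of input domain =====

-- B replaces A's forward pass with a running count-dictionary by sort-then-scan:
-- stably sort (index, value) pairs by value, assign ranks inside runs of equal
-- values, scatter the ranks back to the original positions (alternative algorithm).

-- ===== PORT A =====
-- one forward pass with a mutable dict 'counts' and accumulating list 'indices'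
def occurrence_indices (strings : List String) : List Int :=
  (strings.foldl
    (fun (st : PySem.Dict String Int × List Int) s =>
      let count := st.1.getD s 0
      (st.1.insert s (count + 1), st.2 ++ [count]))
    (PySem.Dict.empty, [])).2

-- ===== PORT B =====
-- loop body of Source B: rank = rank + 1 if s == prev else 0; res[i] = rank; prev = s
def occStep (st : List Int × Option String × Int) (p : Int × String) : List Int × Option String × Int :=
  let rank : Int := if some p.2 == st.2.1 then st.2.2 + 1 else 0
  (st.1.set p.1.toNat rank, some p.2, rank)

-- pairs = sorted(enumerate(strings), key=lambda p: p[1])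
def occPairs (strings : List String) : List (Int × String) :=
  PySem.List.sorted (PySem.List.enumerate strings 0) (fun p => p.2)

-- res = [0]*len(pairs); for i, s in pairs: …; return res
def occurrence_indices_alt (strings : List String) : List Int :=
  (( (occPairs strings).foldl occStep (List.replicate (occPairs strings).length 0, none, 0) )).1

-- ===== PRECONDITION & SPEC =====
def Spec_occurrence_indices (strings : List String) (out : List Int) : Prop := out = occurrence_indices_alt strings
instance (strings : List String) (out : List Int) : Decidable (Spec_occurrence_indices strings out) := by unfold Spec_occurrence_indices; infer_instance

-- ===== CLAIM (what is proved, stated in full; the proofs are below) =====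
def Claim_equal_occurrence_indices : Prop := ∀ (strings : List String), Dom_occurrence_indices strings → Spec_occurrence_indices strings (occurrence_indices strings)

-- ===== LEMMAS AND PROOFS =====

-- the (prev, rank) component of B's scan, separated from the result list
def occG (pr : Option String × Int) (p : Int × String) : Option String × Int :=
  (some p.2, if some p.2 == pr.1 then pr.2 + 1 else 0)

-- the (position, rank) assignments B's scan performs
def occUpd (pr : Option String × Int) : List (Int × String) → List (Nat × Int)
  | [] => []
  | p :: ps => (p.1.toNat, (occG pr p).2) :: occUpd (occG pr p) ps

-- replay a list of assignments on a result list
def occApply (r : List Int) (u : List (Nat × Int)) : List Int :=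
  u.foldl (fun r iv => r.set iv.1 iv.2) r

-- B's fold decomposes into the assignment replay and the (prev, rank) fold
lemma occStep_decompose (l : List (Int × String)) (st : List Int × Option String × Int) :
    l.foldl occStep st = (occApply st.1 (occUpd st.2 l), l.foldl occG st.2) := by
  induction l generalizing st with
  | nil => rfl
  | cons p ps ih =>
    rw [List.foldl_cons, List.foldl_cons, ih]
    rfl

lemma occUpd_append (l₁ l₂ : List (Int × String)) (pr : Option String × Int) :
    occUpd pr (l₁ ++ l₂) = occUpd pr l₁ ++ occUpd (l₁.foldl occG pr) l₂ := by
  induction l₁ generalizing pr with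
  | nil => rfl
  | cons p ps ih => simp [occUpd, ih, List.foldl_cons]

-- the assignments do not depend on the incoming (prev, rank) state when the first
-- scanned value differs from both candidate prev values (the rank resets to 0)
lemma occUpd_congr_head_ne (l : List (Int × String)) (pr₁ pr₂ : Option String × Int)
    (h : ∀ p, l.head? = some p → (some p.2 ≠ pr₁.1 ∧ some p.2 ≠ pr₂.1)) :
    occUpd pr₁ l = occUpd pr₂ l := by
  cases l with
  | nil => rfl
  | cons p ps =>
    obtain ⟨h1, h2⟩ := h p rfl
    have e1 : occG pr₁ p = (some p.2, 0) := by
      simp [occG, beq_iff_eq, h1]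
    have e2 : occG pr₂ p = (some p.2, 0) := by
      simp [occG, beq_iff_eq, h2]
    simp [occUpd, e1, e2]

-- the prev component after a scan is the last value scanned (or the start value)
lemma foldl_occG_fst_mem (l : List (Int × String)) (pr : Option String × Int) :
    (l.foldl occG pr).1 = pr.1 ∨ ∃ p ∈ l, (l.foldl occG pr).1 = some p.2 := by
  induction l generalizing pr with
  | nil => exact Or.inl rfl
  | cons p ps ih =>
    rw [List.foldl_cons]
    rcases ih (occG pr p) with h | ⟨q, hq, hh⟩
    · exact Or.inr ⟨p, List.mem_cons_self, h⟩
    · exact Or.inr ⟨q, List.mem_cons_of_mem _ hq, hh⟩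

-- the rank B would assign to a value x after scanning a key-sorted list whose
-- values are all ≤ x equals the number of occurrences of x in that list
lemma rank_eq_countP (L : List (Int × String))
    (hs : L.Pairwise (fun a b => a.2 ≤ b.2)) (x : String) (hle : ∀ p ∈ L, p.2 ≤ x) :
    (if some x == (L.foldl occG (none, 0)).1 then (L.foldl occG (none, 0)).2 + 1 else 0)
      = (L.countP (fun p => p.2 == x) : Int) := by
  induction L using List.reverseRecOn with
  | nil => simp
  | append_singleton L q ih =>
    have hsL : L.Pairwise (fun a b => a.2 ≤ b.2) := (List.pairwise_append.mp hs).1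
    have hLq : ∀ p ∈ L, p.2 ≤ q.2 := by
      intro p hp
      exact (List.pairwise_append.mp hs).2.2 p hp q (List.mem_singleton_self q)
    have hqx : q.2 ≤ x := hle q (List.mem_append_right _ (List.mem_singleton_self q))
    rw [List.foldl_append]
    by_cases hx : x = q.2
    · subst hx
      have := ih hsL hLq
      simp only [List.foldl_cons, List.foldl_nil, occG, List.countP_append]
      simp only [beq_self_eq_true, if_pos] at *
      rw [this]
      simp
    · have hc0 : L.countP (fun p => p.2 == x) = 0 := by
        rw [List.countP_eq_zero]
        intro p hp
        have : p.2 ≤ q.2 := hLq p hp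
        have : p.2 < x := lt_of_le_of_lt this (lt_of_le_of_ne hqx (Ne.symm hx))
        simp [ne_of_lt this]
      simp only [List.foldl_cons, List.foldl_nil, occG, List.countP_append, hc0]
      have hqx' : ¬ q.2 = x := fun h => hx h.symm
      simp [hx, hqx']

-- PySem's stable-insert splits a list at the first element the new one must precede
lemma insertBy_split {α : Type} (before : α → α → Bool) (e : α) (P : List α) :
    PySem.List.insertBy before e P
      = P.takeWhile (fun q => ! before e q) ++ e :: P.dropWhile (fun q => ! before e q) := by
  induction P with
  | nil => rfl
  | cons y ys ih =>
    by_cases h : before e y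
    · simp [PySem.List.insertBy, h]
    · simp [PySem.List.insertBy, h, ih]

-- every assignment's position comes from a scanned pair
lemma occUpd_mem_fst (l : List (Int × String)) (pr : Option String × Int)
    (iv : Nat × Int) (h : iv ∈ occUpd pr l) : ∃ p ∈ l, iv.1 = p.1.toNat := by
  induction l generalizing pr with
  | nil => simp [occUpd] at h
  | cons p ps ih =>
    rw [occUpd] at h
    rcases List.mem_cons.mp h with h | h
    · exact ⟨p, List.mem_cons_self, by rw [h]⟩
    · obtain ⟨q, hq, hh⟩ := ih (occG pr p) h
      exact ⟨q, List.mem_cons_of_mem _ hq, hh⟩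

lemma occApply_length (u : List (Nat × Int)) (r : List Int) :
    (occApply r u).length = r.length := by
  induction u generalizing r with
  | nil => rfl
  | cons iv us ih => simp [occApply, List.foldl_cons] at *; rw [ih]; simp

lemma occApply_append_assign (u : List (Nat × Int)) (r : List Int) (v : Int)
    (h : ∀ iv ∈ u, iv.1 < r.length) :
    occApply (r ++ [v]) u = occApply r u ++ [v] := by
  induction u generalizing r with
  | nil => rfl
  | cons iv us ih =>
    have hlt : iv.1 < r.length := h iv List.mem_cons_self
    simp only [occApply, List.foldl_cons]
    rw [List.set_append_left _ _ hlt]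
    exact ih (r.set iv.1 iv.2) (by intro jv hjv; simpa using h jv (List.mem_cons_of_mem _ hjv))

lemma occApply_append_u (r : List Int) (u₁ u₂ : List (Nat × Int)) :
    occApply r (u₁ ++ u₂) = occApply (occApply r u₁) u₂ :=
  List.foldl_append

-- every pair in occPairs carries an index 0 ≤ i < n and its value
lemma occPairs_mem (xs : List String) (p : Int × String) (hp : p ∈ occPairs xs) :
    0 ≤ p.1 ∧ p.1 < (xs.length : Int) := by
  have := (PySem.List.mem_sorted _ _ _ _).mp hp
  rw [PySem.List.mem_enumerate_iff] at this
  obtain ⟨k, hk, rfl⟩ := this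
  refine ⟨?_, ?_⟩
  · show (0 : Int) ≤ 0 + (k : Int)
    omega
  · show (0 : Int) + (k : Int) < (xs.length : Int)
    omega

lemma occPairs_pairwise (xs : List String) :
    (occPairs xs).Pairwise (fun a b => a.2 ≤ b.2) :=
  PySem.List.sorted_pairwise _ _

-- occurrences of x among the sorted pairs = occurrences of x in the list
lemma occPairs_countP (xs : List String) (x : String) :
    (occPairs xs).countP (fun p => p.2 == x) = xs.count x := by
  have hperm : (occPairs xs).Perm (PySem.List.enumerate xs 0) :=
    PySem.List.sorted_perm _ _ _
  rw [hperm.countP_eq]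
  have := PySem.List.map_snd_enumerate xs 0
  calc (PySem.List.enumerate xs 0).countP (fun p => p.2 == x)
      = ((PySem.List.enumerate xs 0).map (fun p => p.2)).countP (fun s => s == x) := by
        rw [List.countP_map]; rfl
    _ = xs.count x := by rw [this]; rfl

-- appending one element appends one output entry, for B
lemma occB_snoc (xs : List String) (x : String) :
    occurrence_indices_alt (xs ++ [x]) = occurrence_indices_alt xs ++ [(List.count x xs : Int)] := by
  classical
  set n : Nat := xs.length with hn
  -- the sorted pairs of the extended list = stable insert of the new pair
  have hpairs : occPairs (xs ++ [x])
      = PySem.List.insertBy (fun a b => decide (a.2 < b.2)) ((0 : Int) + n, x) (occPairs xs) := by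
    unfold occPairs
    rw [PySem.List.sorted_eq_foldl_insertBy, PySem.List.enumerate_append, List.foldl_append,
      ← PySem.List.sorted_eq_foldl_insertBy]
    rfl
  set pred : Int × String → Bool := fun q => ! decide (x < q.2) with hpred
  set L := (occPairs xs).takeWhile pred with hL
  set R := (occPairs xs).dropWhile pred with hR
  have hsplit : occPairs xs = L ++ R := (List.takeWhile_append_dropWhile).symm
  have hins : occPairs (xs ++ [x]) = L ++ ((0 : Int) + n, x) :: R := by
    rw [hpairs, insertBy_split]
  -- facts about L and R
  have hLsub : ∀ p ∈ L, p ∈ occPairs xs := fun p hp => hsplit ▸ List.mem_append_left _ hp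
  have hRsub : ∀ p ∈ R, p ∈ occPairs xs := fun p hp => hsplit ▸ List.mem_append_right _ hp
  have hLle : ∀ p ∈ L, p.2 ≤ x := by
    intro p hp
    have h2 := List.mem_takeWhile_imp hp
    rw [hpred] at h2
    simp only [Bool.not_eq_true', decide_eq_false_iff_not, not_lt] at h2
    exact h2
  have hLpw : L.Pairwise (fun a b => a.2 ≤ b.2) :=
    (occPairs_pairwise xs).sublist (hL ▸ List.takeWhile_sublist _)
  have hRpw : R.Pairwise (fun a b => a.2 ≤ b.2) :=
    (occPairs_pairwise xs).sublist (hR ▸ List.dropWhile_sublist _)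
  have hRgt : ∀ p ∈ R, x < p.2 := by
    intro p hp
    cases hhd : R.head? with
    | none => simp [List.head?_eq_none_iff.mp hhd] at hp
    | some h =>
      have hfind : (occPairs xs).find? (fun q => ! pred q) = some h := by
        rw [List.find?_not_eq_head?_dropWhile, ← hR]
        exact hhd
      have hhR := List.find?_some hfind
      have hxh : x < h.2 := by
        rw [hpred] at hhR
        simpa using hhR
      rcases List.head?_eq_some_iff.mp hhd with ⟨t, ht⟩
      rw [ht] at hp
      rcases List.mem_cons.mp hp with rfl | hp
      · exact hxh
      · have : h.2 ≤ p.2 := (List.pairwise_cons.mp (ht ▸ hRpw)).1 p hp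
        exact lt_of_lt_of_le hxh this
  -- the state after scanning L
  set stL := L.foldl occG ((none : Option String), (0 : Int)) with hstL
  have hstL1 : stL.1 = none ∨ ∃ t : String, stL.1 = some t ∧ t ≤ x := by
    rcases foldl_occG_fst_mem L ((none : Option String), (0 : Int)) with h | ⟨p, hp, hh⟩
    · exact Or.inl h
    · exact Or.inr ⟨p.2, hh, hLle p hp⟩
  -- the rank assigned to the inserted pair is count x xs
  have hrank : (occG stL ((0 : Int) + n, x)).2 = (List.count x xs : Int) := by
    have h1 := rank_eq_countP L hLpw x hLle
    have hcR : R.countP (fun p => p.2 == x) = 0 := by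
      rw [List.countP_eq_zero]
      intro p hp
      simp [ne_of_gt (hRgt p hp)]
    have hcnt : L.countP (fun p => p.2 == x) = xs.count x := by
      have := occPairs_countP xs x
      rw [hsplit, List.countP_append, hcR] at this
      omega
    rw [← hstL] at h1
    simp only [occG]
    rw [h1, hcnt]
  -- the assignments after the inserted pair are unaffected by it
  have hRupd : occUpd (occG stL ((0 : Int) + n, x)) R = occUpd stL R := by
    apply occUpd_congr_head_ne
    intro p hp
    have hpR : p ∈ R := List.mem_of_mem_head? hp
    have hpx : x < p.2 := hRgt p hpR
    constructor
    · simp only [occG]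
      simp [ne_of_gt hpx]
    · rcases hstL1 with h | ⟨t, ht, htle⟩
      · simp [h]
      · rw [ht]
        have : t < p.2 := lt_of_le_of_lt htle hpx
        simp [(ne_of_gt this)]
  -- index bounds for the assignments coming from pairs of xs
  have hidx : ∀ (l : List (Int × String)) (pr : Option String × Int),
      (∀ p ∈ l, p ∈ occPairs xs) → ∀ iv ∈ occUpd pr l, iv.1 < n := by
    intro l pr hl iv hiv
    obtain ⟨p, hp, hh⟩ := occUpd_mem_fst l pr iv hiv
    obtain ⟨h0, h1⟩ := occPairs_mem xs p (hl p hp)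
    rw [hh]
    omega
  -- lengths
  have hlenP : (occPairs xs).length = n := by
    unfold occPairs
    rw [PySem.List.length_sorted, PySem.List.length_enumerate]
  have hlenP' : (occPairs (xs ++ [x])).length = n + 1 := by
    rw [hins]
    have := congrArg List.length hsplit
    simp at this ⊢
    omega
  -- assemble
  unfold occurrence_indices_alt
  rw [occStep_decompose, occStep_decompose]
  simp only
  rw [hlenP', hlenP, hins]
  have hupd : occUpd ((none : Option String), (0 : Int)) (L ++ ((0 : Int) + n, x) :: R)
      = occUpd (none, 0) L ++ ((((0 : Int) + n).toNat, (List.count x xs : Int))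
          :: occUpd stL R) := by
    rw [show (L ++ ((0 : Int) + n, x) :: R) = L ++ (((0 : Int) + n, x) :: R) from rfl]
    rw [occUpd_append]
    congr 1
    rw [occUpd, ← hstL, hRupd, hrank]
  rw [hupd]
  have hupd0 : occUpd ((none : Option String), (0 : Int)) (L ++ R)
      = occUpd (none, 0) L ++ occUpd stL R := by
    rw [occUpd_append, hstL]
  rw [hsplit, hupd0]
  -- replay the assignment lists
  rw [show (occUpd ((none : Option String), (0:Int)) L ++ ((((0 : Int) + n).toNat, (List.count x xs : Int)) :: occUpd stL R))
      = occUpd (none, 0) L ++ ([(((0 : Int) + n).toNat, (List.count x xs : Int))] ++ occUpd stL R) from rfl]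
  rw [occApply_append_u, occApply_append_u, occApply_append_u]
  have hrep : List.replicate (n + 1) (0 : Int) = List.replicate n 0 ++ [0] :=
    List.replicate_succ' ..
  rw [hrep]
  set UL := occUpd ((none : Option String), (0 : Int)) L with hUL
  set UR := occUpd stL R with hUR
  have hULidx : ∀ iv ∈ UL, iv.1 < n := hidx L _ hLsub
  have hURidx : ∀ iv ∈ UR, iv.1 < n := hidx R _ hRsub
  have hlen0 : (List.replicate n (0 : Int)).length = n := List.length_replicate
  rw [occApply_append_assign UL _ _ (by rw [hlen0]; exact hULidx)]
  have hlen1 : (occApply (List.replicate n (0 : Int)) UL).length = n := by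
    rw [occApply_length, hlen0]
  have hcast : (((0 : Int) + n).toNat) = n := by omega
  have hmid : occApply (occApply (List.replicate n (0 : Int)) UL ++ [0])
      [(((0 : Int) + n).toNat, (List.count x xs : Int))]
      = occApply (List.replicate n (0 : Int)) UL ++ [(List.count x xs : Int)] := by
    simp only [occApply, List.foldl_cons, List.foldl_nil]
    have hlen1' : (List.foldl (fun r iv => r.set iv.1 iv.2) (List.replicate n (0 : Int)) UL).length = n := hlen1
    rw [List.set_append_right _ _ (by rw [hlen1', hcast])]
    rw [hlen1', hcast]
    simp
  rw [hmid]
  rw [occApply_append_assign UR _ _ (by rw [hlen1]; exact hURidx)]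

-- the dict component of A's pair-fold is the plain insert-counter fold
lemma occA_fst (l : List String) (d : PySem.Dict String Int) (acc : List Int) :
    (l.foldl
      (fun (st : PySem.Dict String Int × List Int) s =>
        let count := st.1.getD s 0
        (st.1.insert s (count + 1), st.2 ++ [count]))
      (d, acc)).1
    = l.foldl (fun d x => d.insert x (d.getD x 0 + 1)) d := by
  induction l generalizing d acc with
  | nil => rfl
  | cons x xs ih => simp [List.foldl, ih]

-- appending one element appends one output entry, for A
lemma occA_snoc (xs : List String) (x : String) :
    occurrence_indices (xs ++ [x]) = occurrence_indices xs ++ [(List.count x xs : Int)] := by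
  unfold occurrence_indices
  rw [List.foldl_append]
  have h := occA_fst xs PySem.Dict.empty []
  set st := xs.foldl
    (fun (st : PySem.Dict String Int × List Int) s =>
      let count := st.1.getD s 0
      (st.1.insert s (count + 1), st.2 ++ [count]))
    (PySem.Dict.empty, []) with hst
  have : st.1.getD x 0 = (List.count x xs : Int) := by
    rw [h, PySem.Dict.getD_foldl_insert_add_one, PySem.Dict.getD_empty]
    ring
  simp [List.foldl, this]

-- A = B on every input (the domain hypothesis is not needed)
lemma occ_eq (strings : List String) : occurrence_indices strings = occurrence_indices_alt strings := by
  induction strings using List.reverseRecOn with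
  | nil => rfl
  | append_singleton xs x ih => rw [occA_snoc, occB_snoc, ih]

-- ===== VERDICT (by name: the statement is the Claim_ definition above) =====
theorem occurrence_indices_spec : Claim_equal_occurrence_indices := by
  intro strings _
  exact occ_eq strings
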